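-- pv_equiv track=rewrite | github.com/ftgg/IoT-Sensor | CD/Code/Python/MSP430.py | __calcChecksumFLASH
-- ===== SOURCE A (Python) =====
-- def __calcChecksumFLASH(data):
--    # FLASH BASED
--    ckh = 0
--    ckl = 0
--    for i in range(len(data)):
--       if i % 2 == 0:
--          ckl ^= data[i]
--       else:
--          ckh ^= data[i]
--
--       ckl ^= 0xFF
--       ckh ^= 0xFF
--    return (ckl,ckh)
-- ===== SOURCE B (Python) =====
-- def __calcChecksumFLASH(data):
--    # Pair loop: consume elements two at a time; the per-iteration 0xFF terms
--    # of the original cancel pairwise, leaving a single parity adjustment.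
--    ckl = 0
--    ckh = 0
--    for i in range(0, len(data) - 1, 2):
--       ckl ^= data[i]
--       ckh ^= data[i + 1]
--    if len(data) % 2 == 1:
--       ckl ^= data[-1]
--       ckl ^= 0xFF
--       ckh ^= 0xFF
--    return (ckl, ckh)
-- ===== Notes on version B (the rewrite author's own statement) =====
-- stated objective: simpler
-- what changed: Replaces the per-index loop with its parity branch and two 0xFF xors every iteration by a pair-at-a-time loop plus a single closed-form parity adjustment (the repeated 0xFF terms cancel pairwise).
import Mathlib
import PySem

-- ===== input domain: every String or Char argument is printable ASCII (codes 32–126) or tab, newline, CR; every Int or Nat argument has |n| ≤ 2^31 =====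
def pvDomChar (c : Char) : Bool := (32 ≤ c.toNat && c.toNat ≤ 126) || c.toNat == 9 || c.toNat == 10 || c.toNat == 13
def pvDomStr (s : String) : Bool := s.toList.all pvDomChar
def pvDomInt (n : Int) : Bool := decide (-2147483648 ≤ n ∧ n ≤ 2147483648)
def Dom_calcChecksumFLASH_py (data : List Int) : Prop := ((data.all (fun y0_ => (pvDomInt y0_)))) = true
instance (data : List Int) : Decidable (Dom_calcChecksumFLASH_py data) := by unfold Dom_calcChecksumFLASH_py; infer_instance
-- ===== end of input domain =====

-- B replaces A's per-index loop (parity branch + two 0xFF xors every iteration) by a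
-- pair-at-a-time loop plus one closed-form parity adjustment at the end (objective: simpler).

-- ===== PORT A =====
def calcChecksumFLASH_py (data : List Int) : Int × Int :=
  -- st = (ckh, ckl), updated per index i of range(len(data)) exactly as A's loop body
  let st := (PySem.List.pyRange 0 (PySem.List.len data) 1).foldl
    (fun (s : Int × Int) i =>
      let s' := if PySem.Int.mod i 2 = 0
        then (s.1, PySem.Int.bxor s.2 (PySem.List.pyGetD data i 0))
        else (PySem.Int.bxor s.1 (PySem.List.pyGetD data i 0), s.2)
      (PySem.Int.bxor s'.1 255, PySem.Int.bxor s'.2 255))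
    ((0 : Int), (0 : Int))
  (st.2, st.1)

-- ===== PORT B =====
def calcChecksumFLASH_py_alt (data : List Int) : Int × Int :=
  -- p = (ckl, ckh); for i in range(0, len(data)-1, 2): ckl ^= data[i]; ckh ^= data[i+1]
  let n := PySem.List.len data
  let p := (PySem.List.pyRange 0 (n - 1) 2).foldl
    (fun (s : Int × Int) i =>
      (PySem.Int.bxor s.1 (PySem.List.pyGetD data i 0),
       PySem.Int.bxor s.2 (PySem.List.pyGetD data (i + 1) 0)))
    ((0 : Int), (0 : Int))
  if PySem.Int.mod n 2 = 1 then
    (PySem.Int.bxor (PySem.Int.bxor p.1 (PySem.List.pyGetD data (-1) 0)) 255,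
     PySem.Int.bxor p.2 255)
  else p

-- ===== PRECONDITION & SPEC =====
def Spec_calcChecksumFLASH_py (data : List Int) (out : Int × Int) : Prop := out = calcChecksumFLASH_py_alt data
instance (data : List Int) (out : Int × Int) : Decidable (Spec_calcChecksumFLASH_py data out) := by unfold Spec_calcChecksumFLASH_py; infer_instance

-- ===== CLAIM (what is proved, stated in full; the proofs are below) =====
def Claim_equal_calcChecksumFLASH_py : Prop := ∀ (data : List Int), Dom_calcChecksumFLASH_py data → Spec_calcChecksumFLASH_py data (calcChecksumFLASH_py data)

-- ===== LEMMAS AND PROOFS =====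

-- A's loop body, named so the lemmas can speak about the fold
def stepA (d : List Int) (s : Int × Int) (i : Int) : Int × Int :=
  let s' := if PySem.Int.mod i 2 = 0
    then (s.1, PySem.Int.bxor s.2 (PySem.List.pyGetD d i 0))
    else (PySem.Int.bxor s.1 (PySem.List.pyGetD d i 0), s.2)
  (PySem.Int.bxor s'.1 255, PySem.Int.bxor s'.2 255)

-- B's loop body
def stepB (d : List Int) (s : Int × Int) (i : Int) : Int × Int :=
  (PySem.Int.bxor s.1 (PySem.List.pyGetD d i 0),
   PySem.Int.bxor s.2 (PySem.List.pyGetD d (i + 1) 0))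

def Afold (d : List Int) : Int × Int :=
  (PySem.List.pyRange 0 (PySem.List.len d) 1).foldl (stepA d) ((0 : Int), (0 : Int))

def Bfold (d : List Int) : Int × Int :=
  (PySem.List.pyRange 0 (PySem.List.len d - 1) 2).foldl (stepB d) ((0 : Int), (0 : Int))

lemma portA_eq (d : List Int) : calcChecksumFLASH_py d = ((Afold d).2, (Afold d).1) := rfl

lemma portB_eq (d : List Int) : calcChecksumFLASH_py_alt d =
    if PySem.Int.mod (PySem.List.len d) 2 = 1 then
      (PySem.Int.bxor (PySem.Int.bxor (Bfold d).1 (PySem.List.pyGetD d (-1) 0)) 255,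
       PySem.Int.bxor (Bfold d).2 255)
    else Bfold d := rfl

-- (xor of even-indexed elements, xor of odd-indexed elements)
def xe : List Int → Int × Int
  | [] => (0, 0)
  | x :: r => (PySem.Int.bxor x (xe r).2, (xe r).1)

def par (n : Nat) : Int := if n % 2 = 1 then 255 else 0

-- algebra of bxor
lemma bxor_eq_xor (a b : Int) : PySem.Int.bxor a b = Int.xor a b := by
  cases a <;> cases b <;> simp [PySem.Int.bxor, Int.xor, Int.negSucc_eq] <;> omega

lemma bxor_assoc (a b c : Int) :
    PySem.Int.bxor (PySem.Int.bxor a b) c = PySem.Int.bxor a (PySem.Int.bxor b c) := by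
  simp only [bxor_eq_xor]
  cases a <;> cases b <;> cases c <;> simp [Int.xor, Nat.xor_assoc]

lemma bxor_swap (z a b : Int) :
    PySem.Int.bxor (PySem.Int.bxor z a) b = PySem.Int.bxor (PySem.Int.bxor z b) a := by
  rw [bxor_assoc, bxor_assoc, PySem.Int.bxor_comm a b]

lemma bxor_cancel (z a : Int) : PySem.Int.bxor (PySem.Int.bxor z a) a = z := by
  rw [bxor_assoc, PySem.Int.bxor_self, PySem.Int.bxor_zero]

lemma bxor_cancel_mid (z a x : Int) :
    PySem.Int.bxor (PySem.Int.bxor (PySem.Int.bxor z a) x) a = PySem.Int.bxor z x := by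
  rw [bxor_swap (PySem.Int.bxor z a) x a, bxor_cancel]

lemma zero_bxor (a : Int) : PySem.Int.bxor 0 a = a := by
  rw [PySem.Int.bxor_comm, PySem.Int.bxor_zero]

lemma mod_two_cast (n : Nat) : PySem.Int.mod (n : Int) 2 = ((n % 2 : Nat) : Int) := by
  exact_mod_cast PySem.Int.mod_natCast n 2

-- indexing helpers
lemma getD_append_lt (xs ys : List Int) (i : Int) (h0 : 0 ≤ i) (h : i < (xs.length : Int)) :
    PySem.List.pyGetD (xs ++ ys) i 0 = PySem.List.pyGetD xs i 0 := by
  obtain ⟨k, rfl⟩ : ∃ k : Nat, i = (k : Int) := ⟨i.toNat, (Int.toNat_of_nonneg h0).symm⟩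
  have hk : k < xs.length := by exact_mod_cast h
  rw [PySem.List.pyGetD_natCast, PySem.List.pyGetD_natCast, List.getD_append _ _ _ _ hk]

lemma getD_append_self (pre : List Int) (y : Int) (suf : List Int) :
    PySem.List.pyGetD (pre ++ y :: suf) (pre.length : Int) 0 = y := by
  rw [PySem.List.pyGetD_natCast]
  simp [List.getD_eq_getElem?_getD]

-- xe over an appended element
lemma xe_append (xs : List Int) (x : Int) :
    xe (xs ++ [x]) = if xs.length % 2 = 0
      then (PySem.Int.bxor (xe xs).1 x, (xe xs).2)
      else ((xe xs).1, PySem.Int.bxor (xe xs).2 x) := by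
  induction xs with
  | nil => simp [xe, zero_bxor, PySem.Int.bxor_zero]
  | cons y xs ih =>
    by_cases h : xs.length % 2 = 0
    · have h' : ¬ (y :: xs).length % 2 = 0 := by simp only [List.length_cons]; omega
      simp only [List.cons_append, xe, ih, if_pos h, if_neg h']
    · have h' : (y :: xs).length % 2 = 0 := by simp only [List.length_cons]; omega
      simp only [List.cons_append, xe, ih, if_neg h, if_pos h']
      exact Prod.ext (by rw [bxor_assoc]) rfl

-- A's fold: appending one element adds one loop iteration at index len xs
lemma Afold_append (xs : List Int) (x : Int) :
    Afold (xs ++ [x]) = stepA (xs ++ [x]) (Afold xs) (xs.length : Int) := by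
  unfold Afold
  have hlen : PySem.List.len (xs ++ [x]) = (PySem.List.len xs) + 1 := by
    simp [PySem.List.len_eq]
  have hnn : (0 : Int) ≤ PySem.List.len xs := by simp [PySem.List.len_eq]
  rw [hlen, PySem.List.pyRange_one_succ_right hnn, List.foldl_append]
  simp only [List.foldl_cons, List.foldl_nil]
  have hfold : (PySem.List.pyRange 0 (PySem.List.len xs) 1).foldl (stepA (xs ++ [x])) ((0:Int), (0:Int))
      = (PySem.List.pyRange 0 (PySem.List.len xs) 1).foldl (stepA xs) ((0:Int), (0:Int)) := by
    apply PySem.List.foldl_congr_mem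
    intro s i hi
    have hi' := (PySem.List.mem_pyRange_one).1 hi
    unfold stepA
    rw [getD_append_lt xs [x] i hi'.1 (by simpa [PySem.List.len_eq] using hi'.2)]
  rw [hfold]
  simp [PySem.List.len_eq]

lemma Afold_closed (d : List Int) :
    Afold d = (PySem.Int.bxor (xe d).2 (par d.length), PySem.Int.bxor (xe d).1 (par d.length)) := by
  induction d using List.reverseRecOn with
  | nil => decide
  | append_singleton xs x ih =>
    rw [Afold_append, ih]
    unfold stepA
    have hx : PySem.List.pyGetD (xs ++ [x]) ((xs.length : Nat) : Int) 0 = x :=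
      getD_append_self xs x []
    by_cases h : xs.length % 2 = 0
    · have hm : PySem.Int.mod ((xs.length : Nat) : Int) 2 = 0 := by
        rw [mod_two_cast, h]; rfl
      have hp : par xs.length = 0 := by simp [par, h]
      have hdvd : (2 : Int) ∣ ((xs.length : Nat) : Int) := by omega
      have hp' : par (xs.length + 1) = 255 := by
        simp only [par]; rw [if_pos (by omega)]
      simp [hx, hp, hdvd, hp', xe_append, h, PySem.Int.bxor_zero]
    · have h1 : xs.length % 2 = 1 := Nat.mod_two_eq_zero_or_one xs.length |>.resolve_left h
      have hm : ¬ PySem.Int.mod ((xs.length : Nat) : Int) 2 = 0 := by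
        rw [mod_two_cast, h1]; decide
      have hp : par xs.length = 255 := by simp [par, h1]
      have hndvd : ¬ (2 : Int) ∣ ((xs.length : Nat) : Int) := by omega
      have hp' : par (xs.length + 1) = 0 := by
        simp only [par]; rw [if_neg (by omega)]
      simp [hx, hp, hndvd, hp', xe_append, h, PySem.Int.bxor_zero,
        bxor_cancel, bxor_cancel_mid]

-- step-2 ranges
lemma range2_even (n : Nat) (h : n % 2 = 0) :
    PySem.List.pyRange 0 (n : Int) 2 = PySem.List.pyRange 0 ((n : Int) - 1) 2 := by
  rw [PySem.List.pyRange_of_pos _ _ (by norm_num), PySem.List.pyRange_of_pos _ _ (by norm_num)]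
  have hc : (if (0:Int) < (n : Int) then (((n : Int) - 0 + 2 - 1) / 2).toNat else 0)
      = (if (0:Int) < (n : Int) - 1 then (((n : Int) - 1 - 0 + 2 - 1) / 2).toNat else 0) := by
    split_ifs <;> omega
  rw [hc]

lemma range2_odd (n : Nat) (h : n % 2 = 1) :
    PySem.List.pyRange 0 (n : Int) 2 =
      PySem.List.pyRange 0 ((n : Int) - 1) 2 ++ [(n : Int) - 1] := by
  rw [PySem.List.pyRange_of_pos _ _ (by norm_num), PySem.List.pyRange_of_pos _ _ (by norm_num)]
  have hc1 : (if (0:Int) < (n : Int) then (((n : Int) - 0 + 2 - 1) / 2).toNat else 0)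
      = (n + 1) / 2 := by
    split_ifs <;> omega
  have hc2 : (if (0:Int) < (n : Int) - 1 then (((n : Int) - 1 - 0 + 2 - 1) / 2).toNat else 0)
      = (n + 1) / 2 - 1 := by
    split_ifs <;> omega
  have hs : (n + 1) / 2 = ((n + 1) / 2 - 1) + 1 := by omega
  rw [hc1, hc2, hs, List.range_succ, List.map_append]
  congr 1
  simp only [List.map_cons, List.map_nil, List.cons.injEq, and_true]
  omega

-- B's fold reads only indices below len xs - 1, so a suffix does not change it
lemma Bfold_congr_append (xs ys : List Int) :
    (PySem.List.pyRange 0 ((xs.length : Int) - 1) 2).foldl (stepB (xs ++ ys)) ((0:Int), (0:Int))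
      = (PySem.List.pyRange 0 ((xs.length : Int) - 1) 2).foldl (stepB xs) ((0:Int), (0:Int)) := by
  apply PySem.List.foldl_congr_mem
  intro s i hi
  have hi' := (PySem.List.mem_pyRange_iff_of_pos (by norm_num : (0:Int) < 2) i).1 hi
  obtain ⟨hi1, hi2, -⟩ := hi'
  unfold stepB
  rw [getD_append_lt xs ys i hi1 (by omega), getD_append_lt xs ys (i+1) (by omega) (by omega)]

lemma Bfold_closed (d : List Int) :
    Bfold d = if d.length % 2 = 1 then xe d.dropLast else xe d := by
  induction d using List.reverseRecOn with
  | nil => decide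
  | append_singleton xs x ih =>
    unfold Bfold
    have hlen : PySem.List.len (xs ++ [x]) - 1 = ((xs.length : Nat) : Int) := by
      simp [PySem.List.len_eq]
    rw [hlen]
    by_cases h : xs.length % 2 = 0
    · have h' : (xs ++ [x]).length % 2 = 1 := by
        simp only [List.length_append, List.length_cons, List.length_nil]; omega
      rw [range2_even xs.length h, Bfold_congr_append]
      have hB : (PySem.List.pyRange 0 ((xs.length : Int) - 1) 2).foldl (stepB xs) ((0:Int), (0:Int)) = Bfold xs := by
        unfold Bfold; congr 2
      rw [hB, ih, if_pos h', if_neg (by omega), List.dropLast_concat]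
    · have h1 : xs.length % 2 = 1 := Nat.mod_two_eq_zero_or_one xs.length |>.resolve_left h
      have h' : ¬ (xs ++ [x]).length % 2 = 1 := by
        simp only [List.length_append, List.length_cons, List.length_nil]; omega
      rw [range2_odd xs.length h1, List.foldl_append, Bfold_congr_append]
      have hB : (PySem.List.pyRange 0 ((xs.length : Int) - 1) 2).foldl (stepB xs) ((0:Int), (0:Int)) = Bfold xs := by
        unfold Bfold; congr 2
      rw [hB, ih, if_pos h1, if_neg h']
      obtain ⟨ys, z, hxs⟩ := (List.eq_nil_or_concat xs).resolve_left (by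
        intro hnil; rw [hnil] at h1; simp at h1)
      rw [List.concat_eq_append] at hxs
      subst hxs
      have hyl : ys.length % 2 = 0 := by
        simp only [List.length_append, List.length_cons, List.length_nil] at h1; omega
      simp only [List.foldl_cons, List.foldl_nil, List.dropLast_concat]
      unfold stepB
      have e1 : (((ys ++ [z]).length : Int) - 1) = ((ys.length : Nat) : Int) := by
        simp [List.length_append]
      have g1 : PySem.List.pyGetD ((ys ++ [z]) ++ [x]) (((ys ++ [z]).length : Int) - 1) 0 = z := by
        rw [e1, List.append_assoc]
        exact getD_append_self ys z [x]
      have g2 : PySem.List.pyGetD ((ys ++ [z]) ++ [x]) ((((ys ++ [z]).length : Int) - 1) + 1) 0 = x := by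
        rw [e1]
        have e2 : ((ys.length : Nat) : Int) + 1 = (((ys ++ [z]).length : Nat) : Int) := by
          simp [List.length_append]
        rw [e2]
        simpa using getD_append_self (ys ++ [z]) x []
      rw [g1, g2, xe_append (ys ++ [z]) x,
        if_neg (by simp only [List.length_append, List.length_cons, List.length_nil]; omega),
        xe_append ys z, if_pos hyl]

-- pulling it together: both ports equal the same closed form
lemma A_closed (d : List Int) :
    calcChecksumFLASH_py d = (PySem.Int.bxor (xe d).1 (par d.length), PySem.Int.bxor (xe d).2 (par d.length)) := by
  rw [portA_eq, Afold_closed]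

lemma B_closed (d : List Int) :
    calcChecksumFLASH_py_alt d = (PySem.Int.bxor (xe d).1 (par d.length), PySem.Int.bxor (xe d).2 (par d.length)) := by
  rw [portB_eq, Bfold_closed]
  by_cases h : d.length % 2 = 1
  · have hm : PySem.Int.mod (PySem.List.len d) 2 = 1 := by
      simp only [PySem.List.len_eq, mod_two_cast, h]; rfl
    rw [if_pos h, if_pos hm]
    have hd : d ≠ [] := by intro hd; rw [hd] at h; simp at h
    obtain ⟨ys, z, hxs⟩ := (List.eq_nil_or_concat d).resolve_left hd
    rw [List.concat_eq_append] at hxs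
    subst hxs
    have hyl : ys.length % 2 = 0 := by
      simp only [List.length_append, List.length_cons, List.length_nil] at h; omega
    have hlast : PySem.List.pyGetD (ys ++ [z]) (-1) 0 = z :=
      PySem.List.pyGetD_neg_one_append_singleton ys z 0
    have hp : par (ys ++ [z]).length = 255 := by
      simp only [par, List.length_append, List.length_cons, List.length_nil]
      rw [if_pos (by omega)]
    rw [List.dropLast_concat, hlast, xe_append ys z, if_pos hyl, hp]
  · have h0 : d.length % 2 = 0 := Nat.mod_two_eq_zero_or_one d.length |>.resolve_right h
    have hm : ¬ PySem.Int.mod (PySem.List.len d) 2 = 1 := by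
      simp only [PySem.List.len_eq, mod_two_cast, h0]; decide
    rw [if_neg h, if_neg hm]
    have hp : par d.length = 0 := by simp [par, h0]
    rw [hp, PySem.Int.bxor_zero, PySem.Int.bxor_zero]

-- ===== VERDICT (by name: the statement is the Claim_ definition above) =====
theorem calcChecksumFLASH_py_spec : Claim_equal_calcChecksumFLASH_py := by
  intro data _
  unfold Spec_calcChecksumFLASH_py
  rw [A_closed, B_closed]
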